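/-
  NON-VACUITY AND INTERFACE CHECKS for the contracts of Vorbis/Spec/Top.lean (briefs/S-TEMPLATE.md, quality checks 2 and 3): for
  each Spec, an `example` that its precondition can be established where the function is called — from the caller's own
  precondition, from a callee's postcondition, or (the stub) from the start state. Nothing here is used by a unit.

      the stub                         `Final.startOK` (Vorbis/Spec/Final.lean): `Top.StartOK` holds of the start state
      decode_all ← the stub            an `example`: `start_fixedLive` / `start_arenaFree` / `start_offText` of `Globals.objs ++ initialObjs len`
      stb_vorbis_open_memory ← decode_all     the same three clauses pass through (one more frame: NOT checked here)
      stb_vorbis_get_frame_float ← decode_all ← stb_vorbis_open_memory's post   `DecodeInv` is literally the clause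
      vorbis_decode_packet ← its two callers, vorbis_decode_initial ← vorbis_decode_packet   `DecodeInv.carry` (DecodeInv.lean): the
                                       frame boundary after a prologue (one more frame, the stack and the shadow changed)
      vorbis_finish_frame ← vorbis_decode_packet's post     `finish_pre_of_w3`
      copy_frame ← stb_vorbis_get_frame_float's post        an `example` over `outputs_live` (the arithmetic `left + r ≤ b1` ⇒ the
                                       `4·r` bytes at `outputs[c]` are live; OUT and the arena do not meet)
      put_header ← decode_all          an `example`
      the readers (S2) ← this file     `reader_env_of_decodePt`: the three clauses of `ReaderEnv others frames (DBlk len A) len f`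
-/
import Vorbis.Spec.Top
import Vorbis.Spec.StartDecoderAt
namespace Vorbis.Spec.TopCheck
open X86 X86.User Asan Vorbis.Spec.Top

/-! ### decode_all's precondition from the stub's state after run_ctors -/

/-- The six globals and the two buffers are off the image's text. -/
theorem start_offText (len : Nat) : ∀ o, o ∈ Vorbis.Globals.objs ++ initialObjs len → L.textHi ≤ o.base := by
  intro o ho
  simp only [Vorbis.Globals.objs, Vorbis.Globals.descs, initialObjs, List.map_cons, List.map_nil, List.reverse_cons,
    List.reverse_nil, List.nil_append, List.cons_append, List.mem_cons, List.not_mem_nil, or_false] at ho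
  rcases ho with rfl | rfl | rfl | rfl | rfl | rfl | rfl | rfl
  all_goals
    simp only [GlobalDesc.obj, Vorbis.Globals.crc_table, Vorbis.Globals.ogg_page_header, Vorbis.Globals.inverse_db_table,
      Vorbis.Globals.log2_4, Vorbis.Globals.range_list, Vorbis.Globals.vorbis, objIN, objOUT]
    decide

/-- Nothing of the start state's objects lies in the arena or is an arena block. -/
theorem start_arenaFree (len : Nat) (hlen : len ≤ 0x1FF000) : ArenaFree (Vorbis.Globals.objs ++ initialObjs len) := by
  intro o ho
  simp only [Vorbis.Globals.objs, Vorbis.Globals.descs, initialObjs, List.map_cons, List.map_nil, List.reverse_cons,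
    List.reverse_nil, List.nil_append, List.cons_append, List.mem_cons, List.not_mem_nil, or_false] at ho
  rcases ho with rfl | rfl | rfl | rfl | rfl | rfl | rfl | rfl
  all_goals
    simp only [GlobalDesc.obj, Vorbis.Globals.crc_table, Vorbis.Globals.ogg_page_header, Vorbis.Globals.inverse_db_table,
      Vorbis.Globals.log2_4, Vorbis.Globals.range_list, Vorbis.Globals.vorbis, objIN, objOUT]
    refine ⟨by decide, by decide, ?_⟩
    omega

/-- One object of the list covers a block: the block is live. -/
theorem live_of_obj {objs : List Obj} {o : Obj} (ho : o ∈ objs) {B : Block} (h1 : o.base ≤ B.base)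
    (h2 : B.base + B.size ≤ o.base + o.size) : B.live (Asan.Live objs) := by
  intro i hi
  refine ⟨o, ho, ?_⟩
  unfold Obj.Bytes
  omega

/-- **The fixed objects are live in the stub's state after run_ctors** (no protected frame yet). -/
theorem start_fixedLive (len : Nat) : FixedLive len (Vorbis.Globals.objs ++ initialObjs len) [] := by
  refine ⟨?_, ?_, ?_, ?_⟩
  · intro B hB
    have hs : stackObjs [] ++ (Vorbis.Globals.objs ++ initialObjs len) = Vorbis.Globals.objs ++ initialObjs len := rfl
    show B.live (Asan.Live (stackObjs [] ++ (Vorbis.Globals.objs ++ initialObjs len)))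
    rw [hs]
    simp only [listBlk, fixedBlocks, globalBlocks, blockOUT, inBlock, IN, List.mem_cons, List.not_mem_nil, or_false] at hB
    rcases hB with rfl | rfl | rfl | rfl | rfl | rfl | rfl | rfl
    · exact live_of_obj (o := objIN len) (by simp [initialObjs]) (Nat.le_refl _) (Nat.le_refl _)
    · exact live_of_obj (o := objOUT) (by simp [initialObjs]) (Nat.le_refl _) (Nat.le_refl _)
    · exact live_of_obj (o := Vorbis.Globals.vorbis.obj) (by simp [Vorbis.Globals.objs, Vorbis.Globals.descs])
        (Nat.le_refl _) (Nat.le_refl _)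
    · exact live_of_obj (o := Vorbis.Globals.range_list.obj) (by simp [Vorbis.Globals.objs, Vorbis.Globals.descs])
        (Nat.le_refl _) (Nat.le_refl _)
    · exact live_of_obj (o := Vorbis.Globals.log2_4.obj) (by simp [Vorbis.Globals.objs, Vorbis.Globals.descs])
        (Nat.le_refl _) (Nat.le_refl _)
    · exact live_of_obj (o := Vorbis.Globals.inverse_db_table.obj) (by simp [Vorbis.Globals.objs, Vorbis.Globals.descs])
        (Nat.le_refl _) (Nat.le_refl _)
    · exact live_of_obj (o := Vorbis.Globals.ogg_page_header.obj) (by simp [Vorbis.Globals.objs, Vorbis.Globals.descs])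
        (Nat.le_refl _) (Nat.le_refl _)
    · exact live_of_obj (o := Vorbis.Globals.crc_table.obj) (by simp [Vorbis.Globals.objs, Vorbis.Globals.descs])
        (Nat.le_refl _) (Nat.le_refl _)
  · intro _
    exact ⟨objIN len, by simp [initialObjs, stackObjs], Nat.le_refl _, Nat.le_refl _⟩
  · exact ⟨objOUT, by simp [initialObjs, stackObjs], Nat.le_refl _, Nat.le_refl _⟩
  · intro o ho
    exact List.mem_append_left _ ho

/-- **decode_all's precondition at the stub's second call**: the state `s` at decode_all's first instruction holds the six
parameter values in the argument registers, its memory has the shadow layer `StartOK.registered` gives (the clean stack ending at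
`rsp + 8` = 800000H) and `log2_4`. -/
example (len : Nat) (hlen : len ≤ 0x1FF000) (s : State)
    (hinv : ShadowInv (Vorbis.Globals.objs ++ initialObjs len) [] ((s.reg .rsp).toNat + 8) s.mem)
    (hrdi : s.reg .rdi = 0x200000) (hrsi : s32 (s.reg .rsi) = (len : Int)) (hrdx : s.reg .rdx = 0x400000)
    (hrcx : s.reg .rcx = 0x300000) (hr8 : s.reg .r8 = 0x800000) (hr9 : s32 (s.reg .r9) = 0x400000) (hlog : Consts s.mem) :
    (decode_all.spec (Vorbis.Globals.objs ++ initialObjs len) [] len).pre s :=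
  ⟨⟨hinv, start_offText len⟩, hrdi, hrsi, hlen, hrdx, hrcx, hr8, hr9, start_fixedLive len, start_arenaFree len hlen, hlog⟩

/-! ### vorbis_finish_frame's precondition from vorbis_decode_packet's postcondition -/

/-- W3 about the three locals is W3′ about the values loaded from them (`mov esi, [len]` …). -/
theorem finish_pre_of_w3 {mem : Mem} {f pLen pLeft pRight : Nat} (h : W3Mem mem f pLen pLeft pRight) :
    FinishPre (stb_vorbis.blocksize_1 mem f) (mem.i32 pLen) (mem.i32 pLeft) (mem.i32 pRight) :=
  h.w3At

/-! ### copy_frame's precondition from stb_vorbis_get_frame_float's postcondition (decode_all's loop) -/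

/-- **The `4·r` bytes at `outputs[c]` are live**: `outputs[c] = channel_buffers[c] + 4·left`, `left + r ≤ b1`, and the channel
buffer is an allocated block of `4·b1` bytes (M6), live by `BlkLive`. -/
theorem outputs_live {len : Nat} {A : Arena} {others : List Obj} {frames : List (Nat × FrameLayout)} {mem : Mem} {f : Nat}
    {stored room : Int} {ysz : Nat → Nat} (h : DecodeInv others frames len A stored room ysz mem f) {pc po : Nat} {r : Int}
    (hout : FrameOut mem f pc po r) (hr : 0 < r) (c : Nat) (hc : (c : Int) < stb_vorbis.channels mem f) :
    LiveBytes others frames (stb_vorbis.outputs mem f c) (4 * r.toNat) := by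
  obtain ⟨_, _, left, hle, hptr⟩ := hout
  have hcfg := Real.VorbisOK.config h.fb.vorbis
  have hm6 := (hcfg.m6 c hc).1
  have hb1 : stb_vorbis.blocksize_1 mem f = (bsize mem f 1 : Int) := HD3.b1_eq hcfg.header.HD3
  rw [hptr c hc]
  refine LiveBytes.of_block (h.fb.env.live _ hm6) ?_ ?_
  · simp only []
    omega
  · simp only []
    omega

/-- **copy_frame's precondition in decode_all's loop** (the registers as decode_all loads them: `dst = out + 32`, `room = (cap − 32) /
4`, `chan = *(&chan) = f + 1000`, `channels = *(&ch)`, `n = r`), at a frame boundary of the harness's arena, after a call of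
stb_vorbis_get_frame_float that returned `r > 0`. -/
example {len : Nat} {A : Arena} {others : List Obj} {frames : List (Nat × FrameLayout)} {f : Nat} {stored room : Int}
    {ysz : Nat → Nat}
    (u : State) (hsh : ShadowPre others frames u) (h : DecodeInv others frames len A stored room ysz u.mem f)
    (hB : A.B = 0x800000) (hfix : FixedLive len others frames) {pc po : Nat} {r : Int}
    (hout : FrameOut u.mem f pc po r) (hr : 0 < r)
    (hrdi : (u.reg .rdi).toNat = 0x400020) (hrsi0 : 0 ≤ s64 (u.reg .rsi)) (hrsi : s64 (u.reg .rsi) ≤ s64 (u.reg .rdx))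
    (hrdx : s64 (u.reg .rdx) = 786424) (hrcx : (u.reg .rcx).toNat = f + 1000)
    (hr8 : s32 (u.reg .r8) = stb_vorbis.channels u.mem f) (hr9 : s32 (u.reg .r9) = r) :
    (copy_frame.spec others frames).pre u := by
  have hcfg := Real.VorbisOK.config h.fb.vorbis
  have hC16 := hcfg.header.HD1.2
  have hA : ArenaOK A others u.mem f := h.fb.ado.ok
  have hobj : A.Block f Off.sizeof.stb_vorbis := h.obj
  have hrange := hA.block_range hobj
  have hob : DBlk len A (objBlock f) := h.fb.vorbis.bits.OB1
  refine ⟨hsh, hrsi0, hrsi, ?_, ?_⟩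
  · rw [hrdi, hrdx]
    have hO : listBlk (fixedBlocks len) blockOUT := by
      simp only [listBlk, fixedBlocks, List.mem_cons, true_or, or_true]
    refine LiveBytes.of_block (hfix.blk _ hO) ?_ ?_
    · simp only [blockOUT]
      omega
    · simp only [blockOUT]
      omega
  · intro c hc
    rw [hr8] at hc
    refine ⟨?_, ?_, ?_⟩
    · rw [hrcx]
      refine LiveBytes.of_block (h.fb.env.live _ hob) ?_ ?_
      · simp only [objBlock]
        omega
      · simp only [objBlock, Off.sizeof.stb_vorbis]
        omega
    · right
      rw [hrdi, hrdx, hrcx]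
      omega
    · intro hn
      rw [hr9] at hn ⊢
      rw [hrcx]
      have e : u.mem.ptr (f + 1000 + 8 * c) = stb_vorbis.outputs u.mem f c := by
        simp only [vacc, voff]
      rw [e]
      exact outputs_live h hout hr c hc

/-! ### put_header's precondition in decode_all -/

/-- `hdr = out = 400000H`: the first 32 bytes of OUT are live; the seventh argument's slot is below the top of the stack. -/
example {len : Nat} {others : List Obj} {frames : List (Nat × FrameLayout)} (u : State) (hsh : ShadowPre others frames u)
    (hfix : FixedLive len others frames) (hrdi : (u.reg .rdi).toNat = 0x400000) (hsp : (u.reg .rsp).toNat + 16 ≤ 0x800000) :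
    (put_header.spec others frames).pre u := by
  refine ⟨hsh, ?_, hsp⟩
  rw [hrdi]
  have hO : listBlk (fixedBlocks len) blockOUT := by
    simp only [listBlk, fixedBlocks, List.mem_cons, true_or, or_true]
  refine LiveBytes.of_block (hfix.blk _ hO) ?_ ?_
  · simp only [blockOUT]
    omega
  · simp only [blockOUT]
    omega

/-! ### The readers' environment (Vorbis/Spec/Reader.lean, S2) from the frame boundary -/

/-- The three clauses of `ReaderEnv others frames (DBlk len A) len f`. -/
theorem reader_env_of_decodePt {len : Nat} {A : Arena} {others : List Obj} {frames : List (Nat × FrameLayout)} {mem : Mem}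
    {f : Nat} {stored room : Int} {ysz : Nat → Nat} (h : DecodeInv others frames len A stored room ysz mem f) :
    BlkLive (DBlk len A) (Asan.Live (stackObjs frames ++ others)) ∧ LiveIn others frames f Off.sizeof.stb_vorbis ∧
      (0 < len → LiveIn others frames IN len) :=
  ⟨h.fb.env.live, h.objLive, h.inp⟩

/-- … and `Bits` for the readers' `ReaderPre.bits`. -/
example {len : Nat} {A : Arena} {others : List Obj} {frames : List (Nat × FrameLayout)} {mem : Mem} {f : Nat}
    {stored room : Int} {ysz : Nat → Nat} (h : DecodeInv others frames len A stored room ysz mem f) : Bits (DBlk len A) len mem f :=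
  h.fb.vorbis.bits

/-! ### The frame boundary for a callee of a protected function -/

/-- **After the prologue of a protected function** (its frame `(base, F)` pushed; the stack and the shadow changed, no allocated
block did): the frame boundary holds for the longer frame list — the `DecodeInv` clause of the precondition of
vorbis_decode_packet (called by stb_vorbis_get_frame_float and vorbis_pump_first_frame), vorbis_decode_initial (by
vorbis_decode_packet), stb_vorbis_get_frame_float (by decode_all). -/
example {len : Nat} {A : Arena} {others : List Obj} {frames : List (Nat × FrameLayout)} {mem mem' : Mem} {f top0 top base : Nat}
    {F : FrameLayout} {stored room : Int} {ysz : Nat → Nat} (h : DecodeInv others frames len A stored room ysz mem f)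
    (hinv0 : ShadowInv others frames top0 mem) (hk : AllKept (DBlk len A) mem mem')
    (hinv : ShadowInv others ((base, F) :: frames) top mem') :
    DecodeInv others ((base, F) :: frames) len A stored room ysz mem' f :=
  h.carry hinv0 hk hinv

/-! ### The hand-over carrier: stb_vorbis_open_memory ⇒ start_decoder ⇒ the decode-time invariant -/

/-- The fixed objects (input, output, globals: all below 700000H) lie outside an arena that starts at or above 800000H — the
`outside` clause of the hand-over carrier for the harness's arena. -/
theorem fixed_outside (len : Nat) (hlen : len ≤ 0x1FF000) {A : Arena} (hB : 0x800000 ≤ A.B) :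
    ∀ C, C ∈ fixedBlocks len → C.base + C.size ≤ A.B ∨ A.B + A.L ≤ C.base := by
  intro C hC
  have := fixed_off_stack len hlen C hC
  simp only [fixedBlocks, globalBlocks, blockOUT, inBlock, IN, List.mem_cons, List.mem_nil_iff, or_false] at hC
  rcases hC with rfl | rfl | rfl | rfl | rfl | rfl | rfl | rfl <;> simp only [] <;> omega

/-- **start_decoder's `HandOK` at its call site in stb_vorbis_open_memory** (the clause S5 added to `start_decoder.spec`'s
precondition, with S4's `outside`): from stb_vorbis_open_memory's own precondition `Top.FixedLive` (the input, the output inside ONE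
object each, the globals as objects: carried over vorbis_init, which adds no object), the stack object `p` of its own protected frame
(a live object of the frame list: `ShadowInv.live_frame`), and the harness's arena `B = 800000H`. -/
theorem handOK_of_fixedLive {len p : Nat} {frames : List (Nat × FrameLayout)} {A : Arena × List Obj}
    (hfix : FixedLive len A.2 frames) (hlen : len ≤ 0x1FF000) (hB : A.1.B = 0x800000)
    (hp : LiveIn A.2 frames p Off.sizeof.stb_vorbis) (hstack : p + Off.sizeof.stb_vorbis ≤ 0x800000) :
    StartDecoder.HandOK len p frames A := by
  have e : L.textHi = 0x119d40 := rfl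
  refine ⟨⟨hp, hfix.inp, hfix.out, hfix.globals, by omega, fixed_outside len hlen (by omega)⟩, ?_⟩
  left
  omega

/-- **What start_decoder's postcondition hands back to stb_vorbis_open_memory** (S9's request: the input, the output, the globals as
objects of the EXIT ghost's list `A.2`, on both exits): the carrier for the exit arena — the one-object clauses that vorbis_deinit
(failure), vorbis_alloc and memcpy (success) ask for, and after `Hand.mono` over vorbis_alloc and `DecodeInv.hand_of_arenaBlk` the
`hand` field of the decode-time invariant of the arena copy. -/
example {len : Nat} {A0 : Arena × List Obj} {frames : List (Nat × FrameLayout)} {u v : State}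
    (hpost : (start_decoder.spec len A0 frames).post u v) :
    ∃ A : Arena × List Obj, A0.1.Extends A.1 ∧ Hand A.2 frames len A.1 (u.reg .rdi).toNat := by
  obtain ⟨A, hext, _, _, hh, _⟩ := hpost
  exact ⟨A, hext, hh.toHand⟩

end Vorbis.Spec.TopCheck
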